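-- pv_equiv track=rewrite | github.com/theshipsagent/us-bulk-supply-chain-platform | 02_TOOLSETS/site_master_registry/src/registry/builder.py | _resolve_sector
-- ===== SOURCE A (Python) =====
-- def _resolve_sector(
--     naics_codes: str,
--     sector_map: dict[str, str],
--     naics_prefixes: list[str],
-- ) -> str:
--     """Determine the best commodity sector from a facility's NAICS codes."""
--     if not naics_codes:
--         return "industrial"
--
--     codes = [c.strip() for c in naics_codes.split(",") if c.strip()]
--
--     # Find the most specific anchor match
--     for prefix in sorted(naics_prefixes, key=len, reverse=True):
--         for code in codes:
--             if code.startswith(prefix):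
--                 return sector_map.get(prefix, "industrial")
--
--     return "industrial"
-- ===== SOURCE B (Python) =====
-- def _resolve_sector(naics_codes, sector_map, naics_prefixes):
--     """One-pass best-match scan: no sort; keep the longest matching prefix
--     (earliest on ties) while walking naics_prefixes once."""
--     if not naics_codes:
--         return "industrial"
--     codes = [c.strip() for c in naics_codes.split(",") if c.strip()]
--     best = None
--     for prefix in naics_prefixes:
--         if (best is None or len(prefix) > len(best)) and any(
--             c.startswith(prefix) for c in codes
--         ):
--             best = prefix
--     if best is None:
--         return "industrial"
--     return sector_map.get(best, "industrial")
-- ===== Notes on version B (the rewrite author's own statement) =====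
-- stated objective: alternative
-- what changed: Replaces A's sort-prefixes-by-length-then-scan-for-first-match with a single unsorted pass over the prefixes that keeps the longest matching prefix (earliest on ties), eliminating the sort.
import Mathlib
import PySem

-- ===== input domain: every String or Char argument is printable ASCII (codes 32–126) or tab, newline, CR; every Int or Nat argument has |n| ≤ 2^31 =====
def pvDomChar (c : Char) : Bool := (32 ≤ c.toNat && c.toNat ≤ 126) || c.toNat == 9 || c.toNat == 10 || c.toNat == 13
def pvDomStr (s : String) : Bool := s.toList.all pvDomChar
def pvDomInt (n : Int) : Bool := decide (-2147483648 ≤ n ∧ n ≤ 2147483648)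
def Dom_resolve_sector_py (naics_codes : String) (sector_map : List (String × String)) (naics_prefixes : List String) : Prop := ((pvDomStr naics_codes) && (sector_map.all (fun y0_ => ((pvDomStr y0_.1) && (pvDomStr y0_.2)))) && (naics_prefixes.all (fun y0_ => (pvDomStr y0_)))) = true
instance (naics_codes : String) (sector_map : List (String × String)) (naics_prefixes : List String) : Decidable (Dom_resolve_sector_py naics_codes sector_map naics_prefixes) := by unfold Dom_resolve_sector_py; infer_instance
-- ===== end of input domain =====

-- B replaces A's sort-the-prefixes-then-scan with a single pass over the prefixes
-- keeping the longest matching one (earliest on ties); objective: alternative (no sort).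

-- ===== PORT A =====
-- the nested 'for prefix in sorted(...): for code in codes: if code.startswith(prefix): return ...'
def pvLoopA (codes : List String) (sector_map : List (String × String)) : List String → String
  | [] => "industrial"
  | pfx :: rest =>
      if codes.any (fun code => PySem.Str.startswith code pfx) then
        (PySem.Dict.ofList sector_map).getD pfx "industrial"
      else pvLoopA codes sector_map rest

def resolve_sector_py (naics_codes : String) (sector_map : List (String × String)) (naics_prefixes : List String) : String :=
  if naics_codes = "" then "industrial"
  else
    let codes := ((PySem.Str.split? naics_codes ",").getD []).filterMap
      (fun c => if PySem.Str.strip c ≠ "" then some (PySem.Str.strip c) else none)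
    pvLoopA codes sector_map (PySem.List.sorted naics_prefixes (fun p => PySem.Str.len p) true)

-- ===== PORT B =====
def resolve_sector_py_alt (naics_codes : String) (sector_map : List (String × String)) (naics_prefixes : List String) : String :=
  if naics_codes = "" then "industrial"
  else
    let codes := ((PySem.Str.split? naics_codes ",").getD []).filterMap
      (fun c => if PySem.Str.strip c ≠ "" then some (PySem.Str.strip c) else none)
    let best := naics_prefixes.foldl
      (fun best pfx =>
        if ((match best with
              | none => true
              | some q => decide (PySem.Str.len q < PySem.Str.len pfx))
            && codes.any (fun code => PySem.Str.startswith code pfx))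
        then some pfx else best)
      (none : Option String)
    match best with
    | none => "industrial"
    | some q => (PySem.Dict.ofList sector_map).getD q "industrial"

-- ===== PRECONDITION & SPEC =====
def Spec_resolve_sector_py (naics_codes : String) (sector_map : List (String × String)) (naics_prefixes : List String) (out : String) : Prop := out = resolve_sector_py_alt naics_codes sector_map naics_prefixes
instance (naics_codes : String) (sector_map : List (String × String)) (naics_prefixes : List String) (out : String) : Decidable (Spec_resolve_sector_py naics_codes sector_map naics_prefixes out) := by unfold Spec_resolve_sector_py; infer_instance

-- ===== CLAIM (what is proved, stated in full; the proofs are below) =====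
def Claim_equal_resolve_sector_py : Prop := ∀ (naics_codes : String) (sector_map : List (String × String)) (naics_prefixes : List String), Dom_resolve_sector_py naics_codes sector_map naics_prefixes → Spec_resolve_sector_py naics_codes sector_map naics_prefixes (resolve_sector_py naics_codes sector_map naics_prefixes)

-- ===== LEMMAS AND PROOFS =====

-- B's fold step, abstracted over the match predicate and the (length) key
def pvStep {α : Type} (key : α → Int) (pred : α → Bool) (b : Option α) (x : α) : Option α :=
  if ((match b with
        | none => true
        | some q => decide (key q < key x))
      && pred x)
  then some x else b

theorem pvFind?_insertBy {α : Type} (key : α → Int) (pred : α → Bool) (x : α) (s : List α)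
    (hs : s.Pairwise (fun a b => key b ≤ key a)) :
    (PySem.List.insertBy (fun a b => decide (key b < key a)) x s).find? pred
      = pvStep key pred (s.find? pred) x := by
  induction s with
  | nil => simp [PySem.List.insertBy, pvStep, List.find?]
  | cons y ys ih =>
    have hy : ∀ z ∈ ys, key z ≤ key y := fun z hz => (List.pairwise_cons.mp hs).1 z hz
    have hys : ys.Pairwise (fun a b => key b ≤ key a) := (List.pairwise_cons.mp hs).2
    by_cases hxy : key y < key x
    · -- x inserted in front
      simp only [PySem.List.insertBy, hxy, decide_true, if_true]
      cases hpx : pred x with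
      | true =>
        rw [List.find?_cons_of_pos hpx]
        cases hfy : (y :: ys).find? pred with
        | none => simp [pvStep, hpx]
        | some q =>
          have hq : q ∈ y :: ys := List.mem_of_find?_eq_some hfy
          have hqle : key q ≤ key y := by
            rcases List.mem_cons.mp hq with h | h
            · simp [h]
            · exact hy q h
          have hlt : key q < key x := lt_of_le_of_lt hqle hxy
          simp [pvStep, hpx, hlt]
      | false =>
        rw [List.find?_cons_of_neg (by simp [hpx])]
        cases hfy : (y :: ys).find? pred with
        | none => simp [pvStep, hpx]
        | some q => simp [pvStep, hpx]
    · -- x goes after y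
      have hb : decide (key y < key x) = false := by simpa using hxy
      have hins : PySem.List.insertBy (fun a b => decide (key b < key a)) x (y :: ys)
          = y :: PySem.List.insertBy (fun a b => decide (key b < key a)) x ys := by
        simp [PySem.List.insertBy, hb]
      rw [hins]
      cases hpy : pred y with
      | true =>
        rw [List.find?_cons_of_pos hpy, List.find?_cons_of_pos hpy]
        simp [pvStep, hb]
      | false =>
        rw [List.find?_cons_of_neg (by simp [hpy]), List.find?_cons_of_neg (by simp [hpy])]
        exact ih hys
  -- note: PySem.List.insertBy unfolds by its equation lemmas through simp

theorem pvFind?_sorted {α : Type} (key : α → Int) (pred : α → Bool) (l : List α) :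
    (PySem.List.sorted l key true).find? pred = l.foldl (pvStep key pred) none := by
  induction l using List.reverseRecOn with
  | nil => rfl
  | append_singleton l x ih =>
    have hsorted : PySem.List.sorted (l ++ [x]) key true
        = PySem.List.insertBy (fun a b => decide (key b < key a)) x (PySem.List.sorted l key true) := by
      rw [PySem.List.sorted_rev_eq_foldl_insertBy, List.foldl_append,
          ← PySem.List.sorted_rev_eq_foldl_insertBy]
      rfl
    rw [hsorted, List.foldl_append,
        pvFind?_insertBy key pred x _ (PySem.List.sorted_pairwise_rev l key), ih]
    rfl

theorem pvLoopA_eq (codes : List String) (sector_map : List (String × String)) (l : List String) :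
    pvLoopA codes sector_map l
      = match l.find? (fun p => codes.any (fun code => PySem.Str.startswith code p)) with
        | none => "industrial"
        | some q => (PySem.Dict.ofList sector_map).getD q "industrial" := by
  induction l with
  | nil => rfl
  | cons p rest ih =>
    rw [pvLoopA]
    simp only [List.find?_cons]
    cases h : codes.any (fun code => PySem.Str.startswith code p) with
    | true => simp
    | false => simp [ih]

-- ===== VERDICT (by name: the statement is the Claim_ definition above) =====
theorem resolve_sector_py_spec : Claim_equal_resolve_sector_py := by
  intro naics_codes sector_map naics_prefixes _
  unfold Spec_resolve_sector_py resolve_sector_py resolve_sector_py_alt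
  by_cases h : naics_codes = ""
  · simp [h]
  · simp only [h, if_false]
    rw [pvLoopA_eq, pvFind?_sorted (fun p => PySem.Str.len p)]
    have hstep :
        (pvStep (fun p : String => PySem.Str.len p)
          (fun p => (((PySem.Str.split? naics_codes ",").getD []).filterMap
              (fun c => if PySem.Str.strip c ≠ "" then some (PySem.Str.strip c) else none)).any
              (fun code => PySem.Str.startswith code p)))
        = (fun (best : Option String) (pfx : String) =>
            if ((match best with
                  | none => true
                  | some q => decide (PySem.Str.len q < PySem.Str.len pfx))
                && (((PySem.Str.split? naics_codes ",").getD []).filterMap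
                    (fun c => if PySem.Str.strip c ≠ "" then some (PySem.Str.strip c) else none)).any
                    (fun code => PySem.Str.startswith code pfx))
            then some pfx else best) := by
      funext b x
      cases b <;> with_unfolding_all rfl
    rw [hstep]
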